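-- pv_equiv track=rewrite | github.com/mahsumaktas/ratchet | scripts/ar-self-review-engine.py | count_trailing_discards
-- ===== SOURCE A (Python) =====
-- def count_trailing_discards(experiments):
--     """Count consecutive DISCARDs from the end."""
--     count = 0
--     for exp in reversed(experiments):
--         if exp.get('decision') != 'KEEP':
--             count += 1
--         else:
--             break
--     return count
-- ===== SOURCE B (Python) =====
-- def count_trailing_discards(experiments):
--     """Count consecutive DISCARDs from the end (forward pass, reset-on-KEEP)."""
--     count = 0
--     for exp in experiments:
--         if exp.get('decision') != 'KEEP':
--             count += 1
--         else:
--             count = 0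
--     return count
-- ===== Notes on version B (the rewrite author's own statement) =====
-- stated objective: alternative
-- what changed: B replaces A's reversed traversal with break-on-KEEP by a single forward pass maintaining a run counter that resets to 0 on each KEEP, returning the length of the final non-KEEP run.
import Mathlib
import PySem

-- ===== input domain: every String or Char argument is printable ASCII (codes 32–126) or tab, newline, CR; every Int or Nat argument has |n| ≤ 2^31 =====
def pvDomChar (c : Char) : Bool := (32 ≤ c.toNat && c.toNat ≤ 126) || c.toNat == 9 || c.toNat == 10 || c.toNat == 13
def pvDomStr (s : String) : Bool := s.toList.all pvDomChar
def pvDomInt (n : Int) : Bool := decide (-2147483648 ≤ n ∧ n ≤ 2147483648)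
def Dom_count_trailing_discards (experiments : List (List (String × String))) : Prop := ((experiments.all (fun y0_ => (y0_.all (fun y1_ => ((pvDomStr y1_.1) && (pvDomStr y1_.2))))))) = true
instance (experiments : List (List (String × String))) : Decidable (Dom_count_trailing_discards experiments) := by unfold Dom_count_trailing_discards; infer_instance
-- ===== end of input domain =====

-- B changes the decomposition: A walks the reversed list and breaks at the first KEEP;
-- B makes one forward pass keeping a counter that resets to 0 on KEEP (objective: alternative).

-- shared transliteration of `exp.get('decision')` (Python dict lookup)
def pvDecision (exp : List (String × String)) : Option String :=
  (PySem.Dict.ofList exp).get? "decision"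

-- ===== PORT A =====
-- loop over reversed(experiments), `break` on KEEP
def pvLoopA : List (List (String × String)) → Int
  | [] => 0
  | x :: rest => if pvDecision x ≠ some "KEEP" then 1 + pvLoopA rest else 0

def count_trailing_discards (experiments : List (List (String × String))) : Int :=
  pvLoopA experiments.reverse

-- ===== PORT B =====
-- forward pass, counter resets on KEEP
def count_trailing_discards_alt (experiments : List (List (String × String))) : Int :=
  experiments.foldl (fun c x => if pvDecision x ≠ some "KEEP" then c + 1 else 0) 0

-- ===== PRECONDITION & SPEC =====
def Spec_count_trailing_discards (experiments : List (List (String × String))) (out : Int) : Prop := out = count_trailing_discards_alt experiments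
instance (experiments : List (List (String × String))) (out : Int) : Decidable (Spec_count_trailing_discards experiments out) := by unfold Spec_count_trailing_discards; infer_instance

-- ===== CLAIM (what is proved, stated in full; the proofs are below) =====
def Claim_equal_count_trailing_discards : Prop := ∀ (experiments : List (List (String × String))), Dom_count_trailing_discards experiments → Spec_count_trailing_discards experiments (count_trailing_discards experiments)

-- ===== LEMMAS AND PROOFS =====

-- the forward reset-counter fold computes the break-on-KEEP scan of the reversed list
theorem pv_fold_eq_loopA (xs : List (List (String × String))) :
    xs.foldl (fun c x => if pvDecision x ≠ some "KEEP" then c + 1 else 0) 0 = pvLoopA xs.reverse := by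
  induction xs using List.reverseRecOn with
  | nil => simp [pvLoopA]
  | append_singleton xs x ih =>
      rw [List.foldl_append, List.reverse_append]
      simp only [List.foldl_cons, List.foldl_nil, List.reverse_singleton, List.singleton_append,
        pvLoopA, ih]
      by_cases h : pvDecision x = some "KEEP"
      · simp [h]
      · rw [if_pos h, if_pos h]; omega

-- ===== VERDICT (by name: the statement is the Claim_ definition above) =====
theorem count_trailing_discards_spec : Claim_equal_count_trailing_discards := by
  intro e _
  unfold Spec_count_trailing_discards count_trailing_discards count_trailing_discards_alt
  rw [pv_fold_eq_loopA]
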